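-- pv_equiv track=rewrite | github.com/Jhryu30/CodingDiary | 프로그래머스/lv1/1845. 폰켓몬/폰켓몬.py | solution
-- ===== SOURCE A (Python) =====
-- from collections import defaultdict
--
-- def solution(nums):
--     answer = 0
--     N = int(len(nums)/2)
--     pokemon = defaultdict(int)
--     for p in nums:
--         pokemon[p]+=1
--
--     pokemon_left = len(pokemon.keys())
--     if pokemon_left>=N:
--         answer += N
--     else:
--         answer += pokemon_left
--
--     return answer
-- ===== SOURCE B (Python) =====
-- def solution(nums):
--     # distinct count via a sorted adjacent scan instead of a hash map
--     s = sorted(nums)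
--     distinct = 0
--     prev = None
--     for x in s:
--         if prev is None or x != prev:
--             distinct += 1
--         prev = x
--     cap = len(nums) // 2
--     return distinct if distinct < cap else cap
-- ===== Notes on version B (the rewrite author's own statement) =====
-- stated objective: alternative
-- what changed: B derives the distinct count from a single adjacent-change scan over sorted(nums) instead of building a defaultdict counter, then takes the min with len(nums)//2.
import Mathlib
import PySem

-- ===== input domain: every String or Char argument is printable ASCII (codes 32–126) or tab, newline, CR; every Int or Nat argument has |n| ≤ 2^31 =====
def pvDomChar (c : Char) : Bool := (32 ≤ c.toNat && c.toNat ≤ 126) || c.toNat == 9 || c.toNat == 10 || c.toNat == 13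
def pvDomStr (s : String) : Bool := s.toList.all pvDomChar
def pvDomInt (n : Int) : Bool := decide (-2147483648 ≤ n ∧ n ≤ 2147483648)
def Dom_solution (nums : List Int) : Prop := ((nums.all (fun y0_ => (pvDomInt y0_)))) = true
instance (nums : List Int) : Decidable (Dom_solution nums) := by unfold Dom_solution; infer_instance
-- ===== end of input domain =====

-- B replaces A's defaultdict counter by one adjacent-change scan over sorted(nums) (alternative decomposition, same result).

-- ===== PORT A =====
-- int(len(nums)/2): float true division then truncation; exact = floor division for these nonnegative lengths
def solution (nums : List Int) : Int :=
  let answer : Int := 0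
  let N : Int := PySem.Int.floordiv (nums.length : Int) 2
  let pokemon : PySem.Dict Int Int :=
    nums.foldl (fun d p => d.modify p 0 (· + 1)) PySem.Dict.empty
  let pokemonLeft : Int := (pokemon.keys.length : Int)
  if pokemonLeft ≥ N then answer + N else answer + pokemonLeft

-- ===== PORT B =====
-- one step of B's loop: prev is None or x != prev → distinct += 1; prev = x
def scanStep (st : Int × Option Int) (x : Int) : Int × Option Int :=
  match st.2 with
  | none => (st.1 + 1, some x)
  | some p => (if x ≠ p then st.1 + 1 else st.1, some x)

def solution_alt (nums : List Int) : Int :=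
  let s := PySem.List.sorted nums (fun x => x) false
  let distinct := (s.foldl scanStep (0, none)).1
  let cap := PySem.Int.floordiv (nums.length : Int) 2
  if distinct < cap then distinct else cap

-- ===== PRECONDITION & SPEC =====
def Spec_solution (nums : List Int) (out : Int) : Prop := out = solution_alt nums
instance (nums : List Int) (out : Int) : Decidable (Spec_solution nums out) := by unfold Spec_solution; infer_instance

-- ===== CLAIM (what is proved, stated in full; the proofs are below) =====
def Claim_equal_solution : Prop := ∀ (nums : List Int), Dom_solution nums → Spec_solution nums (solution nums)

-- ===== LEMMAS AND PROOFS =====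

theorem card_insert_erase (x : Int) (s : Finset Int) :
    (insert x s).card = (s.erase x).card + 1 := by
  by_cases h : x ∈ s
  · rw [Finset.card_insert_of_mem h, Finset.card_erase_of_mem h]
    have := Finset.card_pos.mpr ⟨x, h⟩; omega
  · rw [Finset.card_insert_of_notMem h, Finset.erase_eq_self.mpr h]

-- B's scan over a ≤-sorted tail, with prev = some p below every element, counts the distinct values other than p
theorem scan_some (l : List Int) (hp : l.Pairwise (· ≤ ·)) :
    ∀ (d p : Int), (∀ y ∈ l, p ≤ y) →
      (l.foldl scanStep (d, some p)).1 = d + ((l.toFinset).erase p).card := by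
  induction l with
  | nil => intro d p _; simp
  | cons x t ih =>
    intro d p hle
    rcases List.pairwise_cons.mp hp with ⟨hxt, ht⟩
    by_cases hxp : x = p
    · subst hxp
      rw [List.foldl_cons, show scanStep (d, some x) x = (d, some x) by simp [scanStep],
        ih ht d x hxt, List.toFinset_cons, Finset.erase_insert_eq_erase]
    · have hstep : scanStep (d, some p) x = (d + 1, some x) := by
        simp [scanStep, hxp]
      rw [List.foldl_cons, hstep, ih ht (d + 1) x hxt]
      have hpx : p ∉ (x :: t).toFinset := by
        simp only [List.toFinset_cons, Finset.mem_insert, List.mem_toFinset]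
        rintro (h | h)
        · exact hxp h.symm
        · exact hxp (le_antisymm (hxt p h) (hle x List.mem_cons_self))
      rw [Finset.erase_eq_self.mpr hpx, List.toFinset_cons, card_insert_erase]
      omega

-- B's scan over a ≤-sorted list counts the distinct values
theorem scan_none (l : List Int) (hp : l.Pairwise (· ≤ ·)) :
    (l.foldl scanStep (0, none)).1 = (l.toFinset).card := by
  cases l with
  | nil => simp
  | cons x t =>
    rcases List.pairwise_cons.mp hp with ⟨hx, ht⟩
    rw [List.foldl_cons, show scanStep (0, none) x = (1, some x) from rfl,
      scan_some t ht 1 x hx, List.toFinset_cons, card_insert_erase]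
    omega

-- the length of Python's set(xs) is the number of distinct elements
theorem ofList_length (xs : List Int) :
    (PySem.Set.ofList xs).length = xs.toFinset.card := by
  have hnd : (PySem.Set.ofList xs).Nodup := PySem.Set.nodup_ofList xs
  have hset : (PySem.Set.ofList xs).toFinset = xs.toFinset := by
    ext y; simp [List.mem_toFinset, PySem.Set.mem_ofList]
  rw [← List.toFinset_card_of_nodup hnd, hset]

-- ===== VERDICT (by name: the statement is the Claim_ definition above) =====
theorem solution_spec : Claim_equal_solution := by
  intro nums _
  unfold Spec_solution solution solution_alt
  have hA : (nums.foldl (fun d p => d.modify p 0 (· + 1))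
      (PySem.Dict.empty : PySem.Dict Int Int)).keys.length = nums.toFinset.card := by
    rw [PySem.Dict.keys_foldl_modify]
    simpa using ofList_length nums
  have hs : (PySem.List.sorted nums (fun x => x) false).toFinset = nums.toFinset := by
    ext y; simp [List.mem_toFinset, PySem.List.mem_sorted]
  have hB : ((PySem.List.sorted nums (fun x => x) false).foldl scanStep (0, none)).1
      = nums.toFinset.card := by
    rw [scan_none _ (by simpa using PySem.List.sorted_pairwise nums (fun x => x)), hs]
  simp only [hA, hB]
  split_ifs <;> omega
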